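-- pv_equiv track=rewrite | github.com/GitaTReNt/M3D | inference_medclip_medsam_v3.py | extract_anatomy_keyword
-- ===== SOURCE A (Python) =====
-- def extract_anatomy_keyword(desc):
--     """Extract just the anatomical keyword from description."""
--     # Common anatomy terms to look for
--     anatomy_terms = [
--         "liver", "kidney", "spleen", "lung", "heart", "aorta",
--         "vertebra", "spine", "cervical", "thoracic", "lumbar",
--         "lymph node", "gallbladder", "pancreas", "stomach",
--         "pelvis", "inguinal", "ureter", "bladder", "thyroid",
--         "esophagus", "trachea", "bronch", "rib", "sternum",
--         "colon", "rectum", "adrenal", "prostate", "uterus",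
--         "ovary", "femur", "sacrum", "coccyx", "iliac",
--         "vocal cord", "cartilage", "nodule", "mass", "lesion",
--         "cyst", "tumor", "calcification", "effusion", "ascites",
--     ]
--     desc_lower = desc.lower()
--     found = []
--     for term in anatomy_terms:
--         if term in desc_lower:
--             found.append(term)
--     if found:
--         # Return the most specific (longest) match
--         found.sort(key=len, reverse=True)
--         return found[0]
--     # Fallback: first 5 words
--     return " ".join(desc.split()[:5])
-- ===== SOURCE B (Python) =====
-- def extract_anatomy_keyword(desc):
--     """Extract just the anatomical keyword from description."""
--     anatomy_terms = [
--         "liver", "kidney", "spleen", "lung", "heart", "aorta",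
--         "vertebra", "spine", "cervical", "thoracic", "lumbar",
--         "lymph node", "gallbladder", "pancreas", "stomach",
--         "pelvis", "inguinal", "ureter", "bladder", "thyroid",
--         "esophagus", "trachea", "bronch", "rib", "sternum",
--         "colon", "rectum", "adrenal", "prostate", "uterus",
--         "ovary", "femur", "sacrum", "coccyx", "iliac",
--         "vocal cord", "cartilage", "nodule", "mass", "lesion",
--         "cyst", "tumor", "calcification", "effusion", "ascites",
--     ]
--     desc_lower = desc.lower()
--     # Single pass: keep the longest match seen so far; ties keep the earlier term.
--     best = None
--     for term in anatomy_terms: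
--         if term in desc_lower:
--             if best is None or len(term) > len(best):
--                 best = term
--     if best is not None:
--         return best
--     # Fallback: first 5 words
--     return " ".join(desc.split()[:5])
-- ===== Notes on version B (the rewrite author's own statement) =====
-- stated objective: simpler
-- what changed: Replaces the collect-all-matches list plus stable sort by length descending with a single pass over the term list that keeps the longest match seen so far (strict > so ties keep the earliest term), branching on None for the fallback.
import Mathlib
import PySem

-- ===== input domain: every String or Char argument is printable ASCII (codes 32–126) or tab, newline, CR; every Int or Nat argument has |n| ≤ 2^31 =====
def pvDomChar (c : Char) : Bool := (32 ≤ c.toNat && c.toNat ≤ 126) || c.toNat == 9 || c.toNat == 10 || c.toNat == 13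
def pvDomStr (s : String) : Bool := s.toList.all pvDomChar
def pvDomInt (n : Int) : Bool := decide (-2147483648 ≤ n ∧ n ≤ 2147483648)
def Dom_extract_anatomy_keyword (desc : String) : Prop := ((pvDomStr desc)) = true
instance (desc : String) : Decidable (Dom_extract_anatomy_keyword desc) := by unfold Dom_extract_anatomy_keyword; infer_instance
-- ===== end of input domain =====

-- B replaces A's collect-matches-then-stable-sort-by-length with a single pass keeping
-- the longest match seen so far (strict >, so ties keep the earliest term): simpler, no sort.

-- the module-level constant list both versions scan
def anatomyTerms : List String :=
  ["liver", "kidney", "spleen", "lung", "heart", "aorta", "vertebra", "spine", "cervical",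
   "thoracic", "lumbar", "lymph node", "gallbladder", "pancreas", "stomach", "pelvis",
   "inguinal", "ureter", "bladder", "thyroid", "esophagus", "trachea", "bronch", "rib",
   "sternum", "colon", "rectum", "adrenal", "prostate", "uterus", "ovary", "femur",
   "sacrum", "coccyx", "iliac", "vocal cord", "cartilage", "nodule", "mass", "lesion",
   "cyst", "tumor", "calcification", "effusion", "ascites"]

-- ===== PORT A =====
def extract_anatomy_keyword (desc : String) : String :=
  let descLower := PySem.Str.lower desc
  let found := anatomyTerms.foldl
    (fun acc term => if PySem.Str.isIn term descLower then acc ++ [term] else acc) []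
  match PySem.List.sorted found (fun t => PySem.Str.len t) true with
  | m :: _ => m
  | [] => PySem.Str.join " " (PySem.List.slice (PySem.Str.split₀ desc) none (some 5))

-- ===== PORT B =====
def extract_anatomy_keyword_alt (desc : String) : String :=
  let descLower := PySem.Str.lower desc
  let best := anatomyTerms.foldl
    (fun best term =>
      if PySem.Str.isIn term descLower then
        match best with
        | none => some term
        | some b => if PySem.Str.len b < PySem.Str.len term then some term else best
      else best)
    none
  match best with
  | some b => b
  | none => PySem.Str.join " " (PySem.List.slice (PySem.Str.split₀ desc) none (some 5))

-- ===== PRECONDITION & SPEC =====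
def Spec_extract_anatomy_keyword (desc : String) (out : String) : Prop := out = extract_anatomy_keyword_alt desc
instance (desc : String) (out : String) : Decidable (Spec_extract_anatomy_keyword desc out) := by unfold Spec_extract_anatomy_keyword; infer_instance

-- ===== CLAIM (what is proved, stated in full; the proofs are below) =====
def Claim_equal_extract_anatomy_keyword : Prop := ∀ (desc : String), Dom_extract_anatomy_keyword desc → Spec_extract_anatomy_keyword desc (extract_anatomy_keyword desc)

-- ===== LEMMAS AND PROOFS =====

-- B's accumulator step, abstracted over the key
def bestStep {α κ : Type} [LinearOrder κ] (key : α → κ) (b : Option α) (t : α) : Option α :=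
  match b with
  | none => some t
  | some m => if key m < key t then some t else b

-- inserting one element (reverse comparator) updates the head exactly like bestStep
theorem head_insertBy_rev {α κ : Type} [LinearOrder κ] (key : α → κ) (x : α) (acc : List α) :
    (PySem.List.insertBy (fun a b => decide (key b < key a)) x acc).head? =
      bestStep key acc.head? x := by
  cases acc with
  | nil => rfl
  | cons y ys =>
    simp only [PySem.List.insertBy, bestStep, List.head?_cons]
    split_ifs with h <;> simp_all

-- the head of the insertion-sort fold is B's single-pass fold
theorem head_foldl_insertBy_rev {α κ : Type} [LinearOrder κ] (key : α → κ) (l acc : List α) :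
    (l.foldl (fun acc x => PySem.List.insertBy (fun a b => decide (key b < key a)) x acc) acc).head? =
      l.foldl (bestStep key) acc.head? := by
  induction l generalizing acc with
  | nil => rfl
  | cons x l ih =>
    simp only [List.foldl_cons, ih, head_insertBy_rev]

-- head of Python's stable reverse length-sort = B's fold (first longest element)
theorem head_sorted_rev {α κ : Type} [LinearOrder κ] (key : α → κ) (ys : List α) :
    (PySem.List.sorted ys key true).head? = ys.foldl (bestStep key) none := by
  rw [PySem.List.sorted_rev_eq_foldl_insertBy]
  exact head_foldl_insertBy_rev key ys []

-- ===== VERDICT (by name: the statement is the Claim_ definition above) =====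
theorem extract_anatomy_keyword_spec : Claim_equal_extract_anatomy_keyword := by
  intro desc _
  unfold Spec_extract_anatomy_keyword extract_anatomy_keyword extract_anatomy_keyword_alt
  have hfound :
      anatomyTerms.foldl
        (fun acc term => if PySem.Str.isIn term (PySem.Str.lower desc) then acc ++ [term] else acc) [] =
        anatomyTerms.filter (fun term => PySem.Str.isIn term (PySem.Str.lower desc)) := by
    simpa using PySem.List.foldl_append_if
      (fun term => PySem.Str.isIn term (PySem.Str.lower desc)) (fun t => t) anatomyTerms []
  have hbest :
      anatomyTerms.foldl
        (fun best term =>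
          if PySem.Str.isIn term (PySem.Str.lower desc) then
            match best with
            | none => some term
            | some b => if PySem.Str.len b < PySem.Str.len term then some term else best
          else best) none =
        (anatomyTerms.filter (fun term => PySem.Str.isIn term (PySem.Str.lower desc))).foldl
          (bestStep (fun t => PySem.Str.len t)) none := by
    rw [List.foldl_filter]
    congr 1
    funext b t
    cases b <;> rfl
  simp only [hfound, hbest]
  have hhead := head_sorted_rev (fun t => PySem.Str.len t)
    (anatomyTerms.filter (fun term => PySem.Str.isIn term (PySem.Str.lower desc)))
  cases hs : PySem.List.sorted
      (anatomyTerms.filter (fun term => PySem.Str.isIn term (PySem.Str.lower desc)))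
      (fun t => PySem.Str.len t) true with
  | nil =>
    rw [hs] at hhead
    simp only [List.head?_nil] at hhead
    rw [← hhead]
  | cons m t =>
    rw [hs] at hhead
    simp only [List.head?_cons] at hhead
    rw [← hhead]
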